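-- pv_equiv track=rewrite | github.com/abdullahxyz85/Advent-Of-Code-2025 | Day3/sol2.py | find_max_joltage_part2
-- ===== SOURCE A (Python) =====
-- def find_max_joltage_part2(bank, num_batteries=12):
--     """
--     Find the maximum joltage by selecting exactly num_batteries batteries.
--     Strategy: Greedily select the largest digits while maintaining position order.
--
--     This is similar to finding the largest subsequence of length k.
--     """
--     digits = str(bank).strip()
--     n = len(digits)
--
--     # We need to select num_batteries digits from n total digits
--     # We must drop (n - num_batteries) digits
--     to_drop = n - num_batteries
--
--     if to_drop < 0:
--         # Not enough digits in the bank
--         return int(digits)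
--
--     if to_drop == 0:
--         # Use all digits
--         return int(digits)
--
--     # Use a greedy approach with a stack
--     # We want to keep the largest digits while maintaining order
--     stack = []
--
--     for i, digit in enumerate(digits):
--         # While we can still drop digits and the current digit is larger
--         # than the last digit in our stack, remove from stack
--         while stack and to_drop > 0 and stack[-1] < digit:
--             stack.pop()
--             to_drop -= 1
--
--         stack.append(digit)
--
--     # If we still need to drop more digits, drop from the end
--     while to_drop > 0:
--         stack.pop()
--         to_drop -= 1
--
--     # Convert the selected digits back to integer
--     result = int(''.join(stack))
--     return result
-- ===== SOURCE B (Python) =====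
-- def find_max_joltage_part2(bank, num_batteries=12):
--     digits = str(bank).strip()
--     n = len(digits)
--     if n - num_batteries <= 0:
--         return int(digits)
--     def pick(s, k):
--         if k == 0:
--             return ''
--         window = s[:len(s) - k + 1]
--         m = max(window)
--         i = window.index(m)
--         return m + pick(s[i + 1:], k - 1)
--     return int(pick(digits, num_batteries))
-- ===== Notes on version B (the rewrite author's own statement) =====
-- stated objective: alternative
-- what changed: Replaces A's monotonic-stack greedy (push digits, pop smaller ones while drop budget remains, trim the tail) by recursive window selection: for each output position pick the leftmost maximum of the feasible window and recurse on the suffix after it.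
import Mathlib
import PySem

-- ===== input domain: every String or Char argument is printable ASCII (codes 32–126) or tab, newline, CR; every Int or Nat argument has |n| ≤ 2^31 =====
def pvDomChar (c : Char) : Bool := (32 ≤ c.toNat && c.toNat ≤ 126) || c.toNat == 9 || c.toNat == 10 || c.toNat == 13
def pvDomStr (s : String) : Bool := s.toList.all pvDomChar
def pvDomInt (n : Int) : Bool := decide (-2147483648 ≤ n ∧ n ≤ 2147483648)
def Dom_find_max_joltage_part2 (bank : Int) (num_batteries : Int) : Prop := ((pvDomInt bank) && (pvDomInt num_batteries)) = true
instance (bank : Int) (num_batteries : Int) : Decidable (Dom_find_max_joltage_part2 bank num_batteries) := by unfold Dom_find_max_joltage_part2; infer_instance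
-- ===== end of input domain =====

-- B replaces A's monotonic-stack greedy by per-position window selection (pick the leftmost
-- maximum of the feasible window, then recurse on the suffix): an alternative algorithm of
-- similar cost, not claimed faster.

-- ===== PORT A =====
-- Python's stack (append / pop / peek stack[-1] at the END) is kept REVERSED here:
-- the head of the list is stack[-1]; append = cons, pop = tail.
-- the inner 'while stack and to_drop > 0 and stack[-1] < digit: stack.pop(); to_drop -= 1'
def pvPopA (stack : List Char) (d : Int) (c : Char) : List Char × Int :=
  match stack with
  | [] => ([], d)
  | t :: rest => if 0 < d ∧ t < c then pvPopA rest (d - 1) c else (t :: rest, d)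

-- the 'for i, digit in enumerate(digits)' loop over state (stack, to_drop)
def pvLoopA (ds : List Char) (stack : List Char) (d : Int) : List Char × Int :=
  match ds with
  | [] => (stack, d)
  | c :: cs =>
    let p := pvPopA stack d c
    pvLoopA cs (c :: p.1) p.2

-- the final 'while to_drop > 0: stack.pop(); to_drop -= 1' (on the reversed stack the pops
-- come off the head; popping an empty stack is Python's IndexError, excluded by Pre_)
def pvDropA (stack : List Char) (d : Nat) : List Char :=
  match d, stack with
  | 0, st => st
  | _ + 1, [] => []
  | d' + 1, _ :: rest => pvDropA rest d'

def find_max_joltage_part2 (bank : Int) (num_batteries : Int) : Int :=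
  let digits := PySem.Chars.strip (PySem.Int.toChars bank)   -- str(bank).strip()
  let n : Int := digits.length
  let to_drop := n - num_batteries
  if to_drop < 0 then (PySem.Int.ofChars? digits).getD 0     -- int(digits); some under Pre_
  else if to_drop = 0 then (PySem.Int.ofChars? digits).getD 0
  else
    let p := pvLoopA digits [] to_drop
    let stack := pvDropA p.1 p.2.toNat                       -- to_drop ≥ 0 after the loop
    (PySem.Int.ofChars? stack.reverse).getD 0                -- int(''.join(stack))

-- ===== PORT B =====
-- pick(s, k) from Source B; structural recursion on k (Python's pick decreases k by 1 until 0).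
-- current k is (kk + 1), so the window s[:len(s) - k + 1] is s[:len(s) - (kk+1) + 1]
def pvPickN (s : List Char) : Nat → List Char
  | 0 => []
  | kk + 1 =>
    let window := PySem.List.slice s none (some ((s.length : Int) - ((kk : Int) + 1) + 1))
    match PySem.List.max? window (fun y => y) with            -- max(window); ValueError on [] (outside Pre_)
    | none => []
    | some m =>
      match PySem.List.index? window m with                   -- window.index(m)
      | none => []                                            -- unreachable: m ∈ window
      | some i => m :: pvPickN (s.drop (i + 1)) kk            -- m + pick(s[i+1:], k-1)

def find_max_joltage_part2_alt (bank : Int) (num_batteries : Int) : Int :=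
  let digits := PySem.Chars.strip (PySem.Int.toChars bank)
  let n : Int := digits.length
  if n - num_batteries ≤ 0 then (PySem.Int.ofChars? digits).getD 0
  else (PySem.Int.ofChars? (pvPickN digits num_batteries.toNat)).getD 0  -- num_batteries ≥ 1 under Pre_

-- ===== PRECONDITION & SPEC =====
-- Pre_ excludes only num_batteries ≤ 0, on which A always raises (IndexError popping an
-- empty stack, or ValueError from int('') when num_batteries == 0); B raises there too.
def Pre_find_max_joltage_part2 (bank : Int) (num_batteries : Int) : Prop :=
  1 ≤ num_batteries
instance (bank : Int) (num_batteries : Int) : Decidable (Pre_find_max_joltage_part2 bank num_batteries) := by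
  unfold Pre_find_max_joltage_part2; infer_instance

def pvWitness_find_max_joltage_part2 : Int × Int := (2910, 2)

def Spec_find_max_joltage_part2 (bank : Int) (num_batteries : Int) (out : Int) : Prop := out = find_max_joltage_part2_alt bank num_batteries
instance (bank : Int) (num_batteries : Int) (out : Int) : Decidable (Spec_find_max_joltage_part2 bank num_batteries out) := by unfold Spec_find_max_joltage_part2; infer_instance

-- ===== CLAIM (what is proved, stated in full; the proofs are below) =====
def Claim_equal_find_max_joltage_part2 : Prop := ∀ (bank : Int) (num_batteries : Int), Dom_find_max_joltage_part2 bank num_batteries → Pre_find_max_joltage_part2 bank num_batteries → Spec_find_max_joltage_part2 bank num_batteries (find_max_joltage_part2 bank num_batteries)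

-- ===== LEMMAS AND PROOFS =====

-- the stack algorithm's core on the digit list, with drop budget d
def pvACore (s : List Char) (d : Int) : List Char :=
  (pvDropA (pvLoopA s [] d).1 (pvLoopA s [] d).2.toNat).reverse

lemma pvDropA_eq_drop : ∀ (d : Nat) (st : List Char), pvDropA st d = st.drop d := by
  intro d
  induction d with
  | zero => intro st; cases st <;> simp [pvDropA]
  | succ d ih => intro st; cases st <;> simp [pvDropA, ih]

lemma pvPopA_spec (st : List Char) (d : Int) (c : Char) :
    ∃ p : Nat, p ≤ st.length ∧ ((p : Int) ≤ d ∨ p = 0) ∧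
      pvPopA st d c = (st.drop p, d - p) := by
  induction st generalizing d with
  | nil => exact ⟨0, by simp [pvPopA]⟩
  | cons t rest ih =>
    by_cases h : 0 < d ∧ t < c
    · obtain ⟨p, hp1, hp2, hp3⟩ := ih (d - 1)
      refine ⟨p + 1, by simp; omega, by push_cast; omega, ?_⟩
      simp [pvPopA, h, hp3]; omega
    · exact ⟨0, by simp, by simp, by simp [pvPopA, h]⟩

lemma pvPopA_all (st : List Char) (d : Int) (c : Char)
    (h : ∀ x ∈ st, x < c) (hd : (st.length : Int) ≤ d) :
    pvPopA st d c = ([], d - st.length) := by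
  induction st generalizing d with
  | nil => simp [pvPopA]
  | cons t rest ih =>
    have h1 : 0 < d ∧ t < c := ⟨by simp at hd; omega, h t (by simp)⟩
    rw [pvPopA, if_pos h1, ih (d - 1) (fun x hx => h x (by simp [hx])) (by simp at hd ⊢; omega)]
    simp; ring_nf

lemma pvPopA_append (st : List Char) (m : Char) (d : Int) (c : Char) :
    pvPopA (st ++ [m]) d c =
      if (pvPopA st d c).1 = [] then pvPopA [m] (pvPopA st d c).2 c
      else ((pvPopA st d c).1 ++ [m], (pvPopA st d c).2) := by
  induction st generalizing d with
  | nil => simp [pvPopA]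
  | cons t rest ih =>
    by_cases h : 0 < d ∧ t < c
    · simp only [List.cons_append, pvPopA, if_pos h]; exact ih (d - 1)
    · simp only [List.cons_append, pvPopA, if_neg h]; simp

lemma pvLoopA_absorb (u : List Char) (m : Char) (v : List Char) : ∀ (st : List Char) (d : Int),
    (∀ x ∈ u, x < m) → (∀ x ∈ st, x < m) →
    (u.length : Int) + st.length ≤ d →
    pvLoopA (u ++ m :: v) st d = pvLoopA v [m] (d - u.length - st.length) := by
  induction u with
  | nil =>
    intro st d hu hst hd
    rw [List.nil_append, pvLoopA]
    simp only [pvPopA_all st d m hst (by simpa using hd)]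
    simp
  | cons a u' ih =>
    intro st d hu hst hd
    obtain ⟨p, hp1, hp2, hp3⟩ := pvPopA_spec st d a
    rw [List.cons_append, pvLoopA]
    simp only [hp3]
    rw [ih (a :: st.drop p) (d - p)
      (fun x hx => hu x (by simp [hx]))
      (by
        intro x hx
        rcases List.mem_cons.1 hx with h | h
        · exact h ▸ hu a (by simp)
        · exact hst x (List.mem_of_mem_drop h))
      (by simp at hd ⊢; omega)]
    congr 1
    simp at hd ⊢
    omega

lemma pvLoopA_protect (v : List Char) (m : Char) : ∀ (st : List Char) (b : Int),
    (∀ (j : Nat) (c' : Char), v[j]? = some c' → (j : Int) + st.length < b → ¬ (m < c')) →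
    pvLoopA v (st ++ [m]) b = ((pvLoopA v st b).1 ++ [m], (pvLoopA v st b).2) := by
  induction v with
  | nil => intro st b _; simp [pvLoopA]
  | cons c v' ih =>
    intro st b H
    obtain ⟨p, hp1, hp2, hp3⟩ := pvPopA_spec st b c
    have hpop : pvPopA (st ++ [m]) b c = (st.drop p ++ [m], b - p) := by
      rw [pvPopA_append, hp3]
      by_cases hnil : st.drop p = []
      · have hplen : p = st.length := by
          have := List.drop_eq_nil_iff.1 hnil
          omega
        rw [if_pos hnil, hnil]
        have : ¬ (0 < b - (p : Int) ∧ m < c) := by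
          rintro ⟨hb, hmc⟩
          exact H 0 c (by simp) (by simp; omega) hmc
        simp [pvPopA]
        intro hpb
        exact le_of_not_gt (fun hmc => this ⟨by omega, hmc⟩)
      · rw [if_neg hnil]
    rw [pvLoopA]
    simp only [hpop]
    have hcons : c :: (st.drop p ++ [m]) = (c :: st.drop p) ++ [m] := by simp
    rw [hcons, ih (c :: st.drop p) (b - p)
      (by
        intro j c' hj hlt
        refine H (j + 1) c' (by simpa using hj) ?_
        have hlen : (st.drop p).length = st.length - p := by simp
        push_cast at hlt ⊢
        simp [hlen] at hlt
        omega)]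
    conv_rhs => rw [pvLoopA]
    simp only [hp3]

lemma pvLoopA_conserve (v : List Char) : ∀ (st : List Char) (b : Int), 0 ≤ b →
    ∃ P : Nat, (P : Int) ≤ b ∧ (pvLoopA v st b).1.length + P = st.length + v.length ∧
      (pvLoopA v st b).2 = b - P := by
  induction v with
  | nil => intro st b hb; exact ⟨0, by simpa using hb, by simp [pvLoopA], by simp [pvLoopA]⟩
  | cons c v' ih =>
    intro st b hb
    obtain ⟨p, hp1, hp2, hp3⟩ := pvPopA_spec st b c
    have hple : (p : Int) ≤ b := by rcases hp2 with h | h <;> omega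
    obtain ⟨P', hP1, hP2, hP3⟩ := ih (c :: st.drop p) (b - p) (by omega)
    refine ⟨P' + p, by push_cast; omega, ?_, ?_⟩
    · rw [pvLoopA]; simp only [hp3]
      simp at hP2 ⊢
      omega
    · rw [pvLoopA]; simp only [hp3]
      rw [hP3]; push_cast; ring

lemma pvACore_decomp (u : List Char) (m : Char) (v : List Char) (d : Nat)
    (hu : ∀ x ∈ u, x < m) (hi : u.length ≤ d) (hd : d ≤ u.length + v.length)
    (hv : ∀ (j : Nat) (c' : Char), v[j]? = some c' → (j : Int) < (d : Int) - u.length → c' ≤ m) :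
    pvACore (u ++ m :: v) d = m :: pvACore v ((d : Int) - u.length) := by
  have hb : (0 : Int) ≤ (d : Int) - u.length := by omega
  have habs : pvLoopA (u ++ m :: v) [] d = pvLoopA v [m] ((d : Int) - u.length) := by
    rw [pvLoopA_absorb u m v [] d hu (by simp) (by simp; omega)]
    congr 1; simp
  have hprot : pvLoopA v [m] ((d : Int) - u.length) =
      ((pvLoopA v [] ((d : Int) - u.length)).1 ++ [m], (pvLoopA v [] ((d : Int) - u.length)).2) := by
    have := pvLoopA_protect v m [] ((d : Int) - u.length) ?_
    · simpa using this
    · intro j c' hj hlt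
      exact not_lt.2 (hv j c' hj (by simpa using hlt))
  obtain ⟨P, hP1, hP2, hP3⟩ := pvLoopA_conserve v [] ((d : Int) - u.length) hb
  set Q := pvLoopA v [] ((d : Int) - u.length) with hQ
  have htn : Q.2.toNat = d - u.length - P := by omega
  have hQlen : Q.1.length + P = v.length := by simpa using hP2
  have hle : d - u.length - P ≤ Q.1.length := by omega
  unfold pvACore
  rw [habs, hprot, hP3, pvDropA_eq_drop, pvDropA_eq_drop]
  have htn2 : (((d : Int) - u.length - P)).toNat = d - u.length - P := by omega
  rw [htn2, List.drop_append_of_le_length hle]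
  simp [hQ]

lemma pvCore_eq : ∀ (k : Nat) (s : List Char), k ≤ s.length →
    pvACore s ((s.length : Int) - k) = pvPickN s k := by
  intro k
  induction k with
  | zero =>
    intro s _
    simp only [Nat.cast_zero, sub_zero]
    obtain ⟨P, hP1, hP2, hP3⟩ := pvLoopA_conserve s [] (s.length : Int) (Int.natCast_nonneg _)
    unfold pvACore
    rw [hP3, pvDropA_eq_drop]
    have : ((s.length : Int) - P).toNat = (pvLoopA s [] (s.length : Int)).1.length := by
      simp at hP2; omega
    rw [this]
    simp [pvPickN]
  | succ k ih =>
    intro s hks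
    set n := s.length with hn
    set d := n - (k + 1) with hdd
    have hd1 : d + 1 ≤ n := by omega
    set w := s.take (d + 1) with hw
    have hwlen : w.length = d + 1 := by simp [hw]; omega
    cases hm : PySem.List.max? w (fun y => y) with
    | none =>
      exfalso
      have := (PySem.List.max?_eq_none_iff w (fun y => y)).1 hm
      simp [this] at hwlen
    | some m =>
    have hmem : m ∈ w := PySem.List.max?_mem hm
    obtain ⟨i, hidx⟩ := Option.isSome_iff_exists.1 ((PySem.List.index?_isSome_iff w m).2 hmem)
    obtain ⟨hilt, hwi, hleft⟩ := PySem.List.getElem_of_index?_eq_some hidx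
    rw [hwlen] at hilt
    have hid : i ≤ d := by omega
    have hin : i < n := by omega
    have hsi : s[i]'(by omega) = m := by
      rw [← hwi]; simp [hw]
    have hsplit : s = s.take i ++ m :: s.drop (i + 1) := by
      conv_lhs => rw [← List.take_append_drop i s]
      rw [List.drop_eq_getElem_cons hin, hsi]
    have hulen : (s.take i).length = i := by simp; omega
    set v := s.drop (i + 1) with hv
    have hvlen : v.length = n - i - 1 := by simp [hv]; omega
    have hu : ∀ x ∈ s.take i, x < m := by
      intro x hx
      obtain ⟨j, hj, hxj⟩ := List.mem_iff_getElem.1 hx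
      rw [hulen] at hj
      have hxw : x = w[j]'(by omega) := by
        rw [← hxj]; simp [hw]
      have hne : w[j]'(by omega) ≠ m := hleft j (by omega)
      have hle : w[j]'(by omega) ≤ m := PySem.List.max?_isMax hm _ (List.getElem_mem _)
      rw [hxw]; exact lt_of_le_of_ne hle hne
    have hvcond : ∀ (j : Nat) (c' : Char), v[j]? = some c' →
        (j : Int) < (d : Int) - (s.take i).length → c' ≤ m := by
      intro j c' hj hlt
      rw [hulen] at hlt
      have hjd : i + 1 + j < d + 1 := by omega
      rw [hv, List.getElem?_drop] at hj
      have hjn : i + 1 + j < n := (List.getElem?_eq_some_iff.1 hj).1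
      have hc' : c' = s[i + 1 + j]'hjn := ((List.getElem?_eq_some_iff.1 hj).2).symm
      have : s[i + 1 + j]'hjn = w[i + 1 + j]'(by omega) := by simp [hw]
      rw [hc', this]
      exact PySem.List.max?_isMax hm _ (List.getElem_mem _)
    have hdec := pvACore_decomp (s.take i) m v d hu (by omega) (by omega) hvcond
    rw [← hsplit] at hdec
    have harg : ((n : Int) - (k + 1 : Nat)) = ((d : Nat) : Int) := by omega
    have harg2 : ((d : Int) - (s.take i).length) = ((v.length : Int) - k) := by
      rw [hulen]; omega
    have hih := ih v (by omega)
    rw [harg, hdec, harg2, hih]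
    -- now unfold pvPickN on the right
    have hwin : PySem.List.slice s none (some ((s.length : Int) - ((k : Int) + 1) + 1)) = w := by
      have : ((s.length : Int) - ((k : Int) + 1) + 1) = ((d + 1 : Nat) : Int) := by push_cast; omega
      rw [this, PySem.List.slice_to_natCast]
    rw [pvPickN]
    simp only [hwin, hm, hidx]
    rw [hv]

-- ===== VERDICT (by name: the statement is the Claim_ definition above) =====
theorem find_max_joltage_part2_spec : Claim_equal_find_max_joltage_part2 := by
  intro bank num _ hpre
  unfold Pre_find_max_joltage_part2 at hpre
  unfold Spec_find_max_joltage_part2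
  unfold find_max_joltage_part2 find_max_joltage_part2_alt
  set digits := PySem.Chars.strip (PySem.Int.toChars bank) with hdig
  dsimp only
  by_cases hle : (digits.length : Int) - num ≤ 0
  · rw [if_pos hle]
    split_ifs with h1 h2
    · rfl
    · rfl
    · omega
  · rw [if_neg hle, if_neg (by omega), if_neg (by omega)]
    have hk : num = ((num.toNat : Nat) : Int) := (Int.toNat_of_nonneg (by omega)).symm
    have hcore := pvCore_eq num.toNat digits (by omega)
    unfold pvACore at hcore
    rw [hk]
    simp only [Int.toNat_natCast]
    rw [hcore]
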